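-- pv_equiv track=rewrite | github.com/medbbh/easy-apply | job_scraper.py | get_custom_summary
-- ===== SOURCE A (Python) =====
-- from typing import List, Dict, Optional
--
-- def get_custom_summary(job: Dict) -> str:
--     """Generate custom summary based on job type"""
--     title_lower = job['title'].lower()
--
--     if any(term in title_lower for term in ['frontend', 'front-end', 'react', 'angular', 'vue']):
--         return "Frontend-focused Full Stack Developer with expertise in React, Angular, and modern JavaScript frameworks."
--     elif any(term in title_lower for term in ['backend', 'back-end', 'api', 'server']):
--         return "Backend-focused Full Stack Developer specializing in Python/Django and scalable API development."
--     elif any(term in title_lower for term in ['fullstack', 'full-stack', 'full stack']):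
--         return "Experienced Full Stack Developer with comprehensive expertise in both frontend and backend technologies."
--     elif any(term in title_lower for term in ['data', 'analyst', 'analytics']):
--         return "Analytical professional with strong technical background and expertise in data-driven decision making."
--     elif any(term in title_lower for term in ['mobile', 'ios', 'android', 'flutter', 'react native']):
--         return "Mobile-focused developer with experience in cross-platform development and modern mobile technologies."
--     elif any(term in title_lower for term in ['marketing', 'sales', 'business']):
--         return "Business professional with strong analytical skills and proven track record in growth initiatives."
--     elif any(term in title_lower for term in ['design', 'creative', 'ui', 'ux']):
--         return "Creative professional with technical background and user-centered design approach."
--     else: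
--         return "Versatile technology professional with comprehensive development skills and proven international collaboration experience."
-- ===== SOURCE B (Python) =====
-- _SUMMARIES = [
--     "Frontend-focused Full Stack Developer with expertise in React, Angular, and modern JavaScript frameworks.",
--     "Backend-focused Full Stack Developer specializing in Python/Django and scalable API development.",
--     "Experienced Full Stack Developer with comprehensive expertise in both frontend and backend technologies.",
--     "Analytical professional with strong technical background and expertise in data-driven decision making.",
--     "Mobile-focused developer with experience in cross-platform development and modern mobile technologies.",
--     "Business professional with strong analytical skills and proven track record in growth initiatives.",
--     "Creative professional with technical background and user-centered design approach.",
--     "Versatile technology professional with comprehensive development skills and proven international collaboration experience.",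
-- ]
--
-- # Flat keyword -> category-index map; the category with the SMALLEST matched
-- # index wins, which reproduces the original branch precedence.
-- _KEYWORDS = [
--     ("frontend", 0), ("front-end", 0), ("react", 0), ("angular", 0), ("vue", 0),
--     ("backend", 1), ("back-end", 1), ("api", 1), ("server", 1),
--     ("fullstack", 2), ("full-stack", 2), ("full stack", 2),
--     ("data", 3), ("analyst", 3), ("analytics", 3),
--     ("mobile", 4), ("ios", 4), ("android", 4), ("flutter", 4), ("react native", 4),
--     ("marketing", 5), ("sales", 5), ("business", 5),
--     ("design", 6), ("creative", 6), ("ui", 6), ("ux", 6),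
-- ]
--
--
-- def get_custom_summary(job):
--     """Generate custom summary: min matched category index over a flat keyword map."""
--     title_lower = job['title'].lower()
--     best = len(_SUMMARIES) - 1  # default category
--     for term, idx in _KEYWORDS:
--         if term in title_lower:
--             best = min(best, idx)
--     return _SUMMARIES[best]
-- ===== Notes on version B (the rewrite author's own statement) =====
-- stated objective: alternative
-- what changed: Replaces the seven-branch if/elif chain of any(...) group tests with a flat keyword->category-index map scanned once, aggregating the minimum matched category index (default = last slot) and indexing a summaries array; min over indices reproduces the elif precedence.
import Mathlib
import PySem

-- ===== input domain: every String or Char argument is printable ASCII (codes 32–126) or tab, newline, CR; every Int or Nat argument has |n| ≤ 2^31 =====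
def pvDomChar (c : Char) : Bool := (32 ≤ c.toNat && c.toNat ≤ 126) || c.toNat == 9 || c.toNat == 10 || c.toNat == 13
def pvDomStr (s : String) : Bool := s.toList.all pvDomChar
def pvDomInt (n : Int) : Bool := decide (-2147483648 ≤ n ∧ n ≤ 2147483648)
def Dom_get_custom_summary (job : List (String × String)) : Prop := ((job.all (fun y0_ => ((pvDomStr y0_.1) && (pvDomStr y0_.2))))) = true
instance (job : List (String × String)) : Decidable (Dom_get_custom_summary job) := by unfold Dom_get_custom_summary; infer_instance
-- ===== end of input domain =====

-- B replaces A's seven-branch if/elif chain by a flat keyword->category-index map scanned once,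
-- taking the minimum matched category index (default last) and indexing a summaries array (alternative).


-- ===== PORT A =====
-- job['title'] is a dict lookup; Pre_ excludes the KeyError case, the none branch returns "" (never claimed).
def get_custom_summary (job : List (String × String)) : String :=
  match (PySem.Dict.ofList job).get? "title" with
  | none => ""
  | some title =>
    let title_lower := PySem.Str.lower title
    if ["frontend", "front-end", "react", "angular", "vue"].any (fun term => PySem.Str.isIn term title_lower) then
      "Frontend-focused Full Stack Developer with expertise in React, Angular, and modern JavaScript frameworks."
    else if ["backend", "back-end", "api", "server"].any (fun term => PySem.Str.isIn term title_lower) then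
      "Backend-focused Full Stack Developer specializing in Python/Django and scalable API development."
    else if ["fullstack", "full-stack", "full stack"].any (fun term => PySem.Str.isIn term title_lower) then
      "Experienced Full Stack Developer with comprehensive expertise in both frontend and backend technologies."
    else if ["data", "analyst", "analytics"].any (fun term => PySem.Str.isIn term title_lower) then
      "Analytical professional with strong technical background and expertise in data-driven decision making."
    else if ["mobile", "ios", "android", "flutter", "react native"].any (fun term => PySem.Str.isIn term title_lower) then
      "Mobile-focused developer with experience in cross-platform development and modern mobile technologies."
    else if ["marketing", "sales", "business"].any (fun term => PySem.Str.isIn term title_lower) then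
      "Business professional with strong analytical skills and proven track record in growth initiatives."
    else if ["design", "creative", "ui", "ux"].any (fun term => PySem.Str.isIn term title_lower) then
      "Creative professional with technical background and user-centered design approach."
    else
      "Versatile technology professional with comprehensive development skills and proven international collaboration experience."

-- ===== PORT B =====
def pvSummaries : List String :=
  [ "Frontend-focused Full Stack Developer with expertise in React, Angular, and modern JavaScript frameworks.",
    "Backend-focused Full Stack Developer specializing in Python/Django and scalable API development.",
    "Experienced Full Stack Developer with comprehensive expertise in both frontend and backend technologies.",
    "Analytical professional with strong technical background and expertise in data-driven decision making.",
    "Mobile-focused developer with experience in cross-platform development and modern mobile technologies.",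
    "Business professional with strong analytical skills and proven track record in growth initiatives.",
    "Creative professional with technical background and user-centered design approach.",
    "Versatile technology professional with comprehensive development skills and proven international collaboration experience." ]

-- flat keyword -> category-index map; smallest matched index wins
def pvKeywords : List (String × Nat) :=
  [ ("frontend", 0), ("front-end", 0), ("react", 0), ("angular", 0), ("vue", 0),
    ("backend", 1), ("back-end", 1), ("api", 1), ("server", 1),
    ("fullstack", 2), ("full-stack", 2), ("full stack", 2),
    ("data", 3), ("analyst", 3), ("analytics", 3),
    ("mobile", 4), ("ios", 4), ("android", 4), ("flutter", 4), ("react native", 4),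
    ("marketing", 5), ("sales", 5), ("business", 5),
    ("design", 6), ("creative", 6), ("ui", 6), ("ux", 6) ]

def get_custom_summary_alt (job : List (String × String)) : String :=
  match (PySem.Dict.ofList job).get? "title" with
  | none => ""
  | some title =>
    let title_lower := PySem.Str.lower title
    let best := pvKeywords.foldl
      (fun best p => if PySem.Str.isIn p.1 title_lower then min best p.2 else best)
      (pvSummaries.length - 1)
    pvSummaries.getD best ""   -- best < pvSummaries.length always, so the "" default is never used

-- ===== PRECONDITION & SPEC =====
-- Pre_ excludes exactly the inputs where Python A raises KeyError: dicts without a "title" key.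
def Pre_get_custom_summary (job : List (String × String)) : Prop :=
  ((PySem.Dict.ofList job).contains "title") = true
instance (job : List (String × String)) : Decidable (Pre_get_custom_summary job) := by
  unfold Pre_get_custom_summary; infer_instance

def pvWitness_get_custom_summary : (List (String × String)) := [("title", "Frontend Developer")]

def Spec_get_custom_summary (job : List (String × String)) (out : String) : Prop := out = get_custom_summary_alt job
instance (job : List (String × String)) (out : String) : Decidable (Spec_get_custom_summary job out) := by unfold Spec_get_custom_summary; infer_instance

-- ===== CLAIM (what is proved, stated in full; the proofs are below) =====
def Claim_equal_get_custom_summary : Prop := ∀ (job : List (String × String)), Dom_get_custom_summary job → Pre_get_custom_summary job → Spec_get_custom_summary job (get_custom_summary job)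

-- ===== LEMMAS AND PROOFS =====

-- B's fold over one keyword group (constant index i) computes `min best i` iff some term of the group matches.
theorem pv_fold_group (t : String) (terms : List String) (i best : Nat) :
    List.foldl (fun b p => if PySem.Str.isIn p.1 t then min b p.2 else b) best
      (terms.map (fun s => (s, i))) =
    if terms.any (fun term => PySem.Str.isIn term t) then min best i else best := by
  induction terms generalizing best with
  | nil => simp
  | cons a l ih =>
    simp only [List.map_cons, List.foldl_cons, List.any_cons]
    by_cases h : PySem.Str.isIn a t
    · rw [if_pos h, ih]
      simp only [h, Bool.true_or, if_true]
      split_ifs <;> omega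
    · rw [if_neg h, ih]
      rw [Bool.not_eq_true] at h
      simp only [h, Bool.false_or]

-- ===== VERDICT (by name: the statement is the Claim_ definition above) =====
set_option maxHeartbeats 1000000 in
theorem get_custom_summary_spec : Claim_equal_get_custom_summary := by
  intro job _ _
  unfold Spec_get_custom_summary get_custom_summary get_custom_summary_alt
  cases h : (PySem.Dict.ofList job).get? "title" with
  | none => rfl
  | some title =>
    simp only
    rw [show pvKeywords =
        (["frontend", "front-end", "react", "angular", "vue"].map (fun s => (s, 0)))
        ++ (["backend", "back-end", "api", "server"].map (fun s => (s, 1)))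
        ++ (["fullstack", "full-stack", "full stack"].map (fun s => (s, 2)))
        ++ (["data", "analyst", "analytics"].map (fun s => (s, 3)))
        ++ (["mobile", "ios", "android", "flutter", "react native"].map (fun s => (s, 4)))
        ++ (["marketing", "sales", "business"].map (fun s => (s, 5)))
        ++ (["design", "creative", "ui", "ux"].map (fun s => (s, 6))) from rfl]
    simp only [List.foldl_append, pv_fold_group]
    split_ifs <;> rfl
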